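-- pv_equiv track=rewrite | github.com/mkerin/gsa_ultra | q6_stringy.py | gen_T_array
-- ===== SOURCE A (Python) =====
-- def gen_T_array(n, k, v):
--     """
--     DP algorithm.
--
--     T[i][l] = #{strings with i substrings ss where
--                 val(ss) > v,
--                 at some index l which accounts
--                 for the fact that P(val(ss_i+1) > v)
--                 depends on P(val(ss_i) > v).
--                 ie substrings aren't indep.}
--     A a binary vector
--     A[i] = 1 if i > v else 0.
--
--     First initiate T with T^0, considering
--     only strings length k.
--     Then extend to T^1, considering strings len k+1.
--     etc to T^(n-k).
--     """
--     T = [[0 for l in range(2 ** k)] for i in range((n - k + 1) + 1)]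
--     A = [0 for x in range(v+1)] + [1 for x in range(2**k - (v+1))]
--
--     # Initialise
--     for l, x in enumerate(A):
--         T[x][l] = 1
--
--     # DP - fill T^(lvl+1) from T^ll
--     # start from ii = lvl+1 and work backwards
--     # create new list Ti to replace T[i] to avoid conflicts.
--     for lvl in range(1, n-k+1):
--         for ii in range(lvl+1, -1, -1):
--             Ti = [0 for l in range(2 ** k)]
--             for ll in range(2 ** k):
--
--                 # 2 prev strings feed into string at ll
--                 ll1 = ll // 2
--                 ll2 = ll1 + 2 ** (k-1)
--
--                 # Which i to sum from depends on if A[ll] = 0, 1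
--                 i_prev = ii - A[ll]
--
--                 if ii > 0 or i_prev == 0:
--                     Ti[ll] = T[i_prev][ll1] + T[i_prev][ll2]
--                 else:
--                     # Not elegant but avoids IndexError
--                     Ti[ll] = 0
--             T[ii] = Ti
--     return T
-- ===== SOURCE B (Python) =====
-- def gen_T_array(n, k, v):
--     """Same table as A, computed per-state as generating polynomials
--     (coeff[i] = T[i][state]) and transposed back at the end."""
--     size = 2 ** k
--     A = [0] * (v + 1) + [1] * (size - (v + 1))
--     rows = (n - k + 1) + 1
--     half = size // 2
--
--     # one polynomial per state: degree A[l] coefficient is 1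
--     polys = [[]] * size
--     for l, a in enumerate(A):
--         polys[l] = [0] * a + [1]
--
--     # each level: new[ll] = shift-by-A[ll] of (old[ll//2] + old[ll//2 + half])
--     for _lvl in range(1, n - k + 1):
--         polys = [[0] * A[ll] + _padd(polys[ll // 2], polys[ll // 2 + half])
--                  for ll in range(size)]
--
--     # transpose back, padding every polynomial with zeros up to row rows-1
--     return [[(polys[l][i] if i < len(polys[l]) else 0) for l in range(size)]
--             for i in range(rows)]
--
--
-- def _padd(p, q):
--     """Elementwise sum of two coefficient lists, padding the shorter with zeros."""
--     if len(p) < len(q):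
--         p, q = q, p
--     return [c + (q[i] if i < len(q) else 0) for i, c in enumerate(p)]
-- ===== Notes on version B (the rewrite author's own statement) =====
-- stated objective: alternative
-- what changed: A fills a 2-D table in place, rewriting rows lvl+1..0 of the whole array at every level; B keeps one generating polynomial (coefficient list, coeff[i] = T[i][state]) per state, updates each level by a shift-and-add of two parent polynomials, and transposes the polynomials back into the table at the end.
import Mathlib
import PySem

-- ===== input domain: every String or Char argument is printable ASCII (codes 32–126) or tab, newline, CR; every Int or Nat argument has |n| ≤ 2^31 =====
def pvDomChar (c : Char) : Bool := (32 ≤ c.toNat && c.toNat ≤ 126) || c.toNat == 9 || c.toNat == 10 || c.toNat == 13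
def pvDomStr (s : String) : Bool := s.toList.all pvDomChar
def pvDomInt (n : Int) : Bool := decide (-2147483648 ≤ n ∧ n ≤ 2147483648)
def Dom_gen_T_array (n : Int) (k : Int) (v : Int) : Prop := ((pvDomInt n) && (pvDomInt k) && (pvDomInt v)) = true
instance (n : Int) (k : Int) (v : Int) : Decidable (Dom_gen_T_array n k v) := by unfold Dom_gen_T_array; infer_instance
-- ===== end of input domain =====

-- B re-implements A's 2-D in-place DP as one generating polynomial per state (coeff i = T[i][state]),
-- shifted/summed per level and transposed back at the end; same return value, no speed claim.

-- ===== PORT A =====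
-- A-side helpers: nested read/write T[i][l], and the inner loop building Ti
def pvSet2 (T : List (List Int)) (i l : Nat) (x : Int) : List (List Int) :=
  T.set i ((T.getD i []).set l x)

def pvGet2 (T : List (List Int)) (i : Int) (l : Nat) : Int :=
  (T.getD i.toNat []).getD l 0

-- Ti = [0]*2**k; for ll in range(2**k): Ti[ll] = …  (reads T, never Ti)
def pvTiA (Av : List Int) (half : Nat) (size : Nat) (T : List (List Int)) (ii : Int) : List Int :=
  (List.range size).foldl (fun Ti ll =>
    let ll1 := ll / 2
    let ll2 := ll1 + half
    let iprev := ii - Av.getD ll 0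
    Ti.set ll (if 0 < ii ∨ iprev = 0 then pvGet2 T iprev ll1 + pvGet2 T iprev ll2 else 0))
    (List.replicate size 0)

-- inner "for ii in range(lvl+1, -1, -1): T[ii] = Ti" loop
def pvStepA (Av : List Int) (half : Nat) (size : Nat) (m : Int) (T : List (List Int)) : List (List Int) :=
  (PySem.List.pyRange m (-1) (-1)).foldl (fun T ii => T.set ii.toNat (pvTiA Av half size T ii)) T

def gen_T_array (n : Int) (k : Int) (v : Int) : List (List Int) :=
  let size : Nat := 2 ^ k.toNat
  let rows : Nat := ((n - k + 1) + 1).toNat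
  let T0 : List (List Int) := List.replicate rows (List.replicate size 0)
  let Av : List Int := List.replicate (v + 1).toNat 0 ++
                       List.replicate (((2 : Int) ^ k.toNat) - (v + 1)).toNat 1
  -- for l, x in enumerate(A): T[x][l] = 1
  let T1 := (PySem.List.enumerate Av 0).foldl (fun T p => pvSet2 T p.2.toNat p.1.toNat 1) T0
  (PySem.List.pyRange 1 (n - k + 1) 1).foldl
    (fun T lvl => pvStepA Av (2 ^ (k.toNat - 1)) size (lvl + 1) T) T1

-- ===== PORT B =====
-- B-side helpers: elementwise polynomial sum padding the shorter with zeros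
def pvPaddGo (p q : List Int) : List Int :=
  (PySem.List.enumerate p 0).map
    (fun ic => ic.2 + (if ic.1 < (q.length : Int) then q.getD ic.1.toNat 0 else 0))

def pvPadd (p q : List Int) : List Int :=
  if p.length < q.length then pvPaddGo q p else pvPaddGo p q

-- one level: new[ll] = [0]*A[ll] ++ (old[ll//2] + old[ll//2 + half])
def pvStepB (Av : List Int) (half : Nat) (size : Nat) (P : List (List Int)) : List (List Int) :=
  (List.range size).map (fun ll =>
    List.replicate (Av.getD ll 0).toNat 0 ++ pvPadd (P.getD (ll / 2) []) (P.getD (ll / 2 + half) []))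

def gen_T_array_alt (n : Int) (k : Int) (v : Int) : List (List Int) :=
  let size : Nat := 2 ^ k.toNat
  let Av : List Int := List.replicate (v + 1).toNat 0 ++
                       List.replicate (((2 : Int) ^ k.toNat) - (v + 1)).toNat 1
  let rows : Nat := ((n - k + 1) + 1).toNat
  let half : Nat := size / 2
  -- polys = [[]]*size; for l, a in enumerate(A): polys[l] = [0]*a + [1]
  let polys0 : List (List Int) := (PySem.List.enumerate Av 0).foldl
    (fun P p => P.set p.1.toNat (List.replicate p.2.toNat 0 ++ [1])) (List.replicate size [])
  let polys := (PySem.List.pyRange 1 (n - k + 1) 1).foldl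
    (fun P _lvl => pvStepB Av half size P) polys0
  (List.range rows).map (fun i => (List.range size).map (fun l => (polys.getD l []).getD i 0))

-- ===== PRECONDITION & SPEC =====
-- Pre_ excludes exactly the inputs where A raises: k < 0 (2**k is a float), v outside [-1, 2**k-1]
-- (the init loop indexes T[1][l] past row 0 or A longer than 2**k), n ≤ k-2 (no row 0), n = k-1
-- with some A[l] = 1 (only row 0 exists), and k = 0 with n ≥ 1 (2**(k-1) is a float index).
def Pre_gen_T_array (n : Int) (k : Int) (v : Int) : Prop :=
  0 ≤ k ∧ -1 ≤ v ∧ v < (2 : Int) ^ k.toNat ∧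
  ((1 ≤ k ∧ k ≤ n) ∨ (k = 0 ∧ n = 0) ∨ (n = k - 1 ∧ v = (2 : Int) ^ k.toNat - 1))
instance (n : Int) (k : Int) (v : Int) : Decidable (Pre_gen_T_array n k v) := by
  unfold Pre_gen_T_array; infer_instance

def pvWitness_gen_T_array : Int × Int × Int := (4, 2, 1)

def Spec_gen_T_array (n : Int) (k : Int) (v : Int) (out : List (List Int)) : Prop := out = gen_T_array_alt n k v
instance (n : Int) (k : Int) (v : Int) (out : List (List Int)) : Decidable (Spec_gen_T_array n k v out) := by unfold Spec_gen_T_array; infer_instance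

-- ===== CLAIM (what is proved, stated in full; the proofs are below) =====
def Claim_equal_gen_T_array : Prop := ∀ (n : Int) (k : Int) (v : Int), Dom_gen_T_array n k v → Pre_gen_T_array n k v → Spec_gen_T_array n k v (gen_T_array n k v)

-- ===== LEMMAS AND PROOFS =====

-- getD after set
theorem pv_getD_set {α : Type} (l : List α) (n i : Nat) (a d : α) :
    (l.set n a).getD i d = if n = i ∧ n < l.length then a else l.getD i d := by
  simp only [List.getD_eq_getElem?_getD, List.getElem?_set]
  by_cases h1 : n = i
  · subst h1
    by_cases h2 : n < l.length
    · simp [h2]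
    · rw [if_pos rfl, if_neg h2, if_neg (by tauto), List.getElem?_eq_none (by omega)]
  · rw [if_neg h1, if_neg (by tauto)]

-- shifted list coefficient
theorem pv_shift_getD (a : Nat) (xs : List Int) (i : Nat) :
    (List.replicate a 0 ++ xs).getD i 0 = if i < a then 0 else xs.getD (i - a) 0 := by
  rcases lt_or_ge i a with h | h
  · simp [List.getD_eq_getElem?_getD, List.getElem?_append_left, h]
  · simp [List.getD_eq_getElem?_getD, List.getElem?_append_right, h, List.length_replicate]

-- pvPaddGo / pvPadd characterisation
theorem pvPaddGo_getD (p q : List Int) (h : q.length ≤ p.length) (i : Nat) :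
    (pvPaddGo p q).getD i 0 = p.getD i 0 + q.getD i 0 := by
  rcases lt_or_ge i p.length with hi | hi
  · simp only [pvPaddGo, List.getD_eq_getElem?_getD, List.getElem?_map,
      PySem.List.getElem?_enumerate, List.getElem?_eq_getElem hi, Option.map_some,
      Option.getD_some, zero_add, Int.toNat_natCast]
    rcases lt_or_ge i q.length with hq | hq
    · rw [if_pos (by omega)]
    · rw [if_neg (by omega), List.getElem?_eq_none (by omega)]
      simp
  · have hl : (pvPaddGo p q).length = p.length := by
      simp [pvPaddGo, PySem.List.length_enumerate]
    rw [List.getD_eq_default _ _ (by omega), List.getD_eq_default _ _ hi,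
      List.getD_eq_default _ _ (by omega)]
    simp

theorem pvPadd_getD (p q : List Int) (i : Nat) :
    (pvPadd p q).getD i 0 = p.getD i 0 + q.getD i 0 := by
  unfold pvPadd
  split_ifs with h
  · rw [pvPaddGo_getD q p (by omega), add_comm]
  · exact pvPaddGo_getD p q (by omega) i

theorem pvPadd_length (p q : List Int) : (pvPadd p q).length = max p.length q.length := by
  unfold pvPadd pvPaddGo
  split_ifs with h <;> simp [PySem.List.length_enumerate] <;> omega

-- the value A's inner loop writes at column ll
def pvTiVal (Av : List Int) (half : Nat) (T : List (List Int)) (ii : Int) (ll : Nat) : Int :=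
  if 0 < ii ∨ ii - Av.getD ll 0 = 0
  then pvGet2 T (ii - Av.getD ll 0) (ll / 2) + pvGet2 T (ii - Av.getD ll 0) (ll / 2 + half)
  else 0

-- filling every position of a zero list in order is a map
theorem pv_foldl_set_range (f : Nat → Int) :
    ∀ (m : Nat) (init : List Int), m ≤ init.length →
    (List.range m).foldl (fun acc j => acc.set j (f j)) init
      = (List.range m).map f ++ init.drop m := by
  intro m
  induction m with
  | zero => intro init _; simp
  | succ m ih =>
    intro init h
    rw [List.range_succ, List.foldl_append, List.map_append, List.foldl_cons, List.foldl_nil,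
      ih init (by omega), List.set_append]
    have hlen : (List.map f (List.range m)).length = m := by simp
    have hd : List.drop m init = init[m]'(by omega) :: List.drop (m+1) init :=
      List.drop_eq_getElem_cons (by omega)
    rw [if_neg (by omega), hlen, Nat.sub_self, hd, List.set_cons_zero, List.map_singleton,
      List.append_assoc, List.singleton_append]

theorem pvTiA_eq_map (Av : List Int) (half size : Nat) (T : List (List Int)) (ii : Int) :
    pvTiA Av half size T ii = (List.range size).map (pvTiVal Av half T ii) := by
  have h := pv_foldl_set_range (pvTiVal Av half T ii) size (List.replicate size 0) (by simp)
  simpa [pvTiA, pvTiVal] using h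

theorem pvTiA_length (Av : List Int) (half size : Nat) (T : List (List Int)) (ii : Int) :
    (pvTiA Av half size T ii).length = size := by
  rw [pvTiA_eq_map]; simp

theorem pvTiVal_congr (Av : List Int) (half : Nat) (T T' : List (List Int)) (ii : Int) (ll : Nat)
    (hA : Av.getD ll 0 = 0 ∨ Av.getD ll 0 = 1)
    (h : ∀ j : Nat, j ≤ ii.toNat → T.getD j [] = T'.getD j []) :
    pvTiVal Av half T ii ll = pvTiVal Av half T' ii ll := by
  unfold pvTiVal pvGet2
  have hle : (ii - Av.getD ll 0).toNat ≤ ii.toNat := by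
    rcases hA with h0 | h0 <;> rw [h0] <;> omega
  rw [h _ hle]

theorem pvTiA_congr (Av : List Int) (half size : Nat) (T T' : List (List Int)) (ii : Int)
    (hAv : ∀ ll, Av.getD ll 0 = 0 ∨ Av.getD ll 0 = 1)
    (h : ∀ j : Nat, j ≤ ii.toNat → T.getD j [] = T'.getD j []) :
    pvTiA Av half size T ii = pvTiA Av half size T' ii := by
  rw [pvTiA_eq_map, pvTiA_eq_map]
  exact List.map_congr_left (fun ll _ => pvTiVal_congr Av half T T' ii ll (hAv ll) h)

-- structure preserved by the descending row-update fold (index form)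
theorem pv_foldl_rows (Av : List Int) (half size : Nat) (L : List Int) :
    ∀ (T : List (List Int)),
    (L.foldl (fun T ii => T.set ii.toNat (pvTiA Av half size T ii)) T).length = T.length ∧
    ((∀ i : Nat, i < T.length → (T.getD i []).length = size) →
     ∀ i : Nat, i < T.length → ((L.foldl (fun T ii => T.set ii.toNat (pvTiA Av half size T ii)) T).getD i []).length = size) := by
  induction L with
  | nil => intro T; exact ⟨rfl, fun h => h⟩
  | cons x L ih =>
    intro T
    obtain ⟨ih1, ih2⟩ := ih (T.set x.toNat (pvTiA Av half size T x))
    rw [List.foldl_cons]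
    refine ⟨by rw [ih1, List.length_set], fun h i hi => ?_⟩
    refine ih2 (fun j hj => ?_) i (by simpa using hi)
    rw [pv_getD_set]
    split_ifs with hc
    · exact pvTiA_length _ _ _ _ _
    · exact h j (by simpa using hj)

theorem pvStepA_length (Av : List Int) (half size : Nat) (m : Int) (T : List (List Int)) :
    (pvStepA Av half size m T).length = T.length :=
  (pv_foldl_rows Av half size _ T).1

theorem pvStepA_rows (Av : List Int) (half size : Nat) (m : Int) (T : List (List Int))
    (h : ∀ i : Nat, i < T.length → (T.getD i []).length = size) :
    ∀ i : Nat, i < T.length → ((pvStepA Av half size m T).getD i []).length = size :=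
  (pv_foldl_rows Av half size _ T).2 h

theorem pvStepA_getD (Av : List Int) (half size : Nat)
    (hAv : ∀ ll, Av.getD ll 0 = 0 ∨ Av.getD ll 0 = 1) :
    ∀ (m : Nat) (T : List (List Int)), m < T.length → ∀ i : Nat,
    (pvStepA Av half size (m : Int) T).getD i []
      = if i ≤ m then pvTiA Av half size T (i : Int) else T.getD i [] := by
  intro m
  induction m with
  | zero =>
    intro T hm i
    unfold pvStepA
    rw [PySem.List.pyRange_neg_one_cons (by omega), show ((0:Nat):Int) - 1 = -1 by simp,
      PySem.List.pyRange_neg_one_eq_nil (by omega), List.foldl_cons, List.foldl_nil]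
    rw [show (((0:Nat):Int)).toNat = 0 from rfl, pv_getD_set]
    rcases Nat.eq_zero_or_pos i with h0 | h0
    · subst h0; rw [if_pos ⟨rfl, hm⟩, if_pos (le_refl 0)]
    · rw [if_neg (by omega), if_neg (by omega)]
  | succ m ih =>
    intro T hm i
    unfold pvStepA
    rw [PySem.List.pyRange_neg_one_cons (by omega), List.foldl_cons,
      show ((m + 1 : Nat) : Int) - 1 = (m : Int) by push_cast; ring]
    have hT' : m < (T.set ((m+1 : Nat) : Int).toNat (pvTiA Av half size T ((m+1 : Nat) : Int))).length := by
      simp [List.length_set]; omega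
    have := ih _ hT' i
    unfold pvStepA at this
    rw [this]
    set T' := T.set ((m+1 : Nat) : Int).toNat (pvTiA Av half size T ((m+1 : Nat) : Int)) with hT'def
    rcases le_or_gt i m with hi | hi
    · rw [if_pos hi, if_pos (by omega)]
      refine pvTiA_congr Av half size T' T _ hAv ?_
      intro j hj
      rw [hT'def, pv_getD_set, if_neg (by simp at hj ⊢; omega)]
    · rw [if_neg (by omega), hT'def, pv_getD_set]
      rcases eq_or_ne i (m+1) with he | he
      · subst he
        rw [if_pos ⟨by simp, by simpa using hm⟩, if_pos (le_refl _)]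
      · rw [if_neg (by simp; omega), if_neg (by omega)]

theorem pvSet2_getD2 (T : List (List Int)) (x l' i l : Nat) (c : Int) :
    ((pvSet2 T x l' c).getD i []).getD l 0
      = if x = i ∧ x < T.length then
          (if l' = l ∧ l' < (T.getD x []).length then c else (T.getD x []).getD l 0)
        else (T.getD i []).getD l 0 := by
  unfold pvSet2
  rw [pv_getD_set, apply_ite (fun r => List.getD r l 0), pv_getD_set]

-- structure preserved by the init fold (index form)
theorem pv_init_rows (size : Nat) (E : List (Int × Int)) :
    ∀ (T : List (List Int)),
    (E.foldl (fun T p => pvSet2 T p.2.toNat p.1.toNat 1) T).length = T.length ∧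
    ((∀ i : Nat, i < T.length → (T.getD i []).length = size) →
     ∀ i : Nat, i < T.length → ((E.foldl (fun T p => pvSet2 T p.2.toNat p.1.toNat 1) T).getD i []).length = size) := by
  induction E with
  | nil => intro T; exact ⟨rfl, fun h => h⟩
  | cons p E ih =>
    intro T
    obtain ⟨ih1, ih2⟩ := ih (pvSet2 T p.2.toNat p.1.toNat 1)
    have hlen : (pvSet2 T p.2.toNat p.1.toNat 1).length = T.length := by
      simp [pvSet2, List.length_set]
    rw [List.foldl_cons]
    refine ⟨by rw [ih1, hlen], fun h i hi => ?_⟩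
    refine ih2 (fun j hj => ?_) i (by omega)
    unfold pvSet2
    rw [pv_getD_set]
    split_ifs with hc
    · rw [List.length_set]; exact h _ hc.2
    · exact h j (by omega)

-- value computed by the init fold (T[x][l] = 1 for each (l, x) in enumerate Av)
theorem pv_init_getD (size : Nat) :
    ∀ (Av : List Int) (s : Nat) (T : List (List Int)),
    (∀ i : Nat, i < T.length → (T.getD i []).length = size) →
    (∀ j : Nat, (Av.getD j 0).toNat < T.length) →
    s + Av.length ≤ size →
    ∀ (i l : Nat),
    (((PySem.List.enumerate Av (s : Int)).foldl (fun T p => pvSet2 T p.2.toNat p.1.toNat 1) T).getD i []).getD l 0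
      = if s ≤ l ∧ l < s + Av.length ∧ i = (Av.getD (l - s) 0).toNat then 1
        else (T.getD i []).getD l 0 := by
  intro Av
  induction Av with
  | nil =>
    intro s T _ _ _ i l
    rw [PySem.List.enumerate_nil, List.foldl_nil, if_neg (by simp; omega)]
  | cons x Av ih =>
    intro s T hrow hx hsz i l
    rw [PySem.List.enumerate_cons, List.foldl_cons,
      show ((s : Int) + 1) = ((s + 1 : Nat) : Int) by push_cast; ring,
      show (((s : Int), x)).2.toNat = x.toNat from rfl,
      show (((s : Int), x)).1.toNat = s by simp]
    have hxT : x.toNat < T.length := by simpa using hx 0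
    have hrow' : ∀ i : Nat, i < (pvSet2 T x.toNat s 1).length →
        ((pvSet2 T x.toNat s 1).getD i []).length = size := by
      intro j hj
      unfold pvSet2
      rw [pv_getD_set]
      split_ifs with hc
      · rw [List.length_set]; exact hrow _ hc.2
      · exact hrow j (by simpa [pvSet2] using hj)
    have hx' : ∀ j : Nat, (Av.getD j 0).toNat < (pvSet2 T x.toNat s 1).length := by
      intro j
      have := hx (j + 1)
      simpa [pvSet2, List.length_set] using this
    have hres := ih (s + 1) (pvSet2 T x.toNat s 1) hrow' hx'
      (by simp at hsz; omega) i l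
    rw [hres]
    have hset := pvSet2_getD2 T x.toNat s i l 1
    by_cases hls : l = s
    · subst hls
      rw [if_neg (by omega), hset]
      have hrl : (T.getD x.toNat []).length = size := hrow _ hxT
      by_cases hix : i = x.toNat
      · rw [if_pos (⟨hix.symm, hxT⟩ : x.toNat = i ∧ x.toNat < T.length),
          if_pos (⟨rfl, by simp at hsz; omega⟩ : l = l ∧ l < (T.getD x.toNat []).length),
          if_pos (⟨le_refl l, by simp, by simpa using hix⟩ :
            l ≤ l ∧ l < l + (x :: Av).length ∧ i = ((x :: Av).getD (l - l) 0).toNat)]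
      · rw [if_neg (fun hcon => hix hcon.1.symm),
          if_neg (fun hcon => hix (by simpa using hcon.2.2))]
    · have hTl : ((pvSet2 T x.toNat s 1).getD i []).getD l 0 = (T.getD i []).getD l 0 := by
        rw [hset]
        split_ifs with h1 h2
        · omega
        · rw [h1.1]
        · rfl
      rw [hTl]
      by_cases hc : s + 1 ≤ l ∧ l < s + 1 + Av.length ∧ i = (Av.getD (l - (s + 1)) 0).toNat
      · rw [if_pos hc, if_pos ?_]
        refine ⟨by omega, by simp; omega, ?_⟩
        have hd : l - s = (l - (s + 1)) + 1 := by omega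
        rw [hd, List.getD_cons_succ]
        exact hc.2.2
      · rw [if_neg hc, if_neg ?_]
        intro hcon
        apply hc
        refine ⟨by omega, by simp at hcon ⊢; omega, ?_⟩
        have hd : l - s = (l - (s + 1)) + 1 := by omega
        rw [hd, List.getD_cons_succ] at hcon
        exact hcon.2.2

-- filling a preallocated list from enumerate is a map (B's polys initialisation)
theorem pv_enum_set_fill {α : Type} (f : Int → α) (Av : List Int) :
    ∀ (s : Nat) (P : List α), s + Av.length ≤ P.length →
    (PySem.List.enumerate Av (s : Int)).foldl (fun P p => P.set p.1.toNat (f p.2)) P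
      = P.take s ++ Av.map f ++ P.drop (s + Av.length) := by
  induction Av with
  | nil =>
    intro s P h
    simp [PySem.List.enumerate_nil, List.take_append_drop]
  | cons x Av ih =>
    intro s P h
    rw [PySem.List.enumerate_cons, List.foldl_cons,
      show ((s : Int) + 1) = ((s + 1 : Nat) : Int) by push_cast; ring,
      show (((s : Int), x)).2 = x from rfl,
      show (((s : Int), x)).1.toNat = s by simp,
      ih (s + 1) (P.set s (f x)) (by simp at h ⊢; omega)]
    have hsP : s < P.length := by simp at h; omega
    have htake : (P.set s (f x)).take (s + 1) = P.take s ++ [f x] := by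
      rw [List.take_set, List.take_add_one, List.getElem?_eq_getElem hsP]
      rw [List.set_append, if_neg (by simp)]
      simp [Nat.min_eq_left hsP.le]
    have hdrop : (P.set s (f x)).drop (s + 1 + Av.length) = P.drop (s + (x :: Av).length) := by
      rw [List.drop_set, if_pos (by omega), show s + 1 + Av.length = s + (x :: Av).length by simp; omega]
    rw [htake, hdrop]
    simp [List.append_assoc]

theorem pv_getD_replicate {α : Type} (n i : Nat) (a d : α) :
    (List.replicate n a).getD i d = if i < n then a else d := by
  rcases lt_or_ge i n with h | h
  · simp [List.getD_eq_getElem?_getD, h]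
  · rw [List.getD_eq_default _ _ (by simpa using h), if_neg (by omega)]

-- the invariant: T is the (rows × size) table, P the per-state coefficient lists
def pvRel (rows size t : Nat) (T P : List (List Int)) : Prop :=
  T.length = rows ∧
  (∀ i : Nat, i < T.length → (T.getD i []).length = size) ∧
  P.length = size ∧
  (∀ l : Nat, (P.getD l []).length ≤ t + 2) ∧
  (∀ i l : Nat, i < rows → l < size → (T.getD i []).getD l 0 = (P.getD l []).getD i 0)

theorem pvStepB_getD (Av : List Int) (half size : Nat) (P : List (List Int)) (ll : Nat)
    (h : ll < size) :
    (pvStepB Av half size P).getD ll []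
      = List.replicate (Av.getD ll 0).toNat 0 ++ pvPadd (P.getD (ll / 2) []) (P.getD (ll / 2 + half) []) := by
  unfold pvStepB
  exact PySem.List.getD_map_range _ _ _ _ h

theorem pv_step_rel (rows size half : Nat) (Av : List Int)
    (hsz : size = 2 * half)
    (hAv : ∀ ll, Av.getD ll 0 = 0 ∨ Av.getD ll 0 = 1)
    (t : Nat) (T P : List (List Int))
    (hrel : pvRel rows size t T P) (hrows : t + 3 ≤ rows) :
    pvRel rows size (t + 1) (pvStepA Av half size ((t : Int) + 2) T) (pvStepB Av half size P) := by
  obtain ⟨hT, hTr, hP, hPl, hTP⟩ := hrel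
  have hcast : ((t : Int) + 2) = ((t + 2 : Nat) : Int) := by push_cast; ring
  have hgetA := pvStepA_getD Av half size hAv (t + 2) T (by omega)
  refine ⟨by rw [pvStepA_length, hT],
    fun i hi => pvStepA_rows Av half size _ T hTr i (by rwa [pvStepA_length] at hi),
    by simp [pvStepB], ?_, ?_⟩
  · -- new coefficient lists are short
    intro l
    rcases lt_or_ge l size with hl | hl
    · rw [pvStepB_getD Av half size P l hl, List.length_append, List.length_replicate, pvPadd_length]
      have h1 := hPl (l / 2)
      have h2 := hPl (l / 2 + half)
      rcases hAv l with h0 | h0 <;> rw [h0] <;>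
        simp only [Int.toNat_zero, Int.toNat_one] <;> omega
    · rw [List.getD_eq_default _ _ (by simp [pvStepB]; omega)]
      simp
  · -- pointwise agreement
    intro i l hi hl
    have hhalf : 0 < half := by omega
    have hl2 : l / 2 < size := by omega
    have hl2h : l / 2 + half < size := by omega
    rw [hcast, hgetA i, pvStepB_getD Av half size P l hl, pv_shift_getD, pvPadd_getD]
    rcases le_or_gt i (t + 2) with hit | hit
    · rw [if_pos hit, pvTiA_eq_map, PySem.List.getD_map_range _ _ _ _ hl]
      unfold pvTiVal pvGet2
      rcases hAv l with h0 | h0 <;> rw [h0]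
      · rw [if_pos (by omega), if_neg (by omega : ¬ i < (0:Int).toNat)]
        rw [show ((i:Int) - 0).toNat = i by omega]
        simp only [Int.toNat_zero, Nat.sub_zero]
        rw [hTP i (l / 2) hi hl2, hTP i (l / 2 + half) hi hl2h]
      · rcases Nat.eq_zero_or_pos i with h0i | h0i
        · subst h0i
          rw [if_neg (by simp), if_pos (by simp)]
        · rw [if_pos (by left; exact_mod_cast h0i), if_neg (by omega : ¬ i < (1:Int).toNat)]
          rw [show ((i:Int) - 1).toNat = i - 1 by omega]
          rw [hTP (i - 1) (l / 2) (by omega) hl2, hTP (i - 1) (l / 2 + half) (by omega) hl2h]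
          rw [show (1:Int).toNat = 1 from rfl]
    · rw [if_neg (by omega)]
      have hz1 : (P.getD (l / 2) []).getD (i - (Av.getD l 0).toNat) 0 = 0 := by
        apply List.getD_eq_default
        have := hPl (l / 2)
        rcases hAv l with h0 | h0 <;> rw [h0] <;> omega
      have hz2 : (P.getD (l / 2 + half) []).getD (i - (Av.getD l 0).toNat) 0 = 0 := by
        apply List.getD_eq_default
        have := hPl (l / 2 + half)
        rcases hAv l with h0 | h0 <;> rw [h0] <;> omega
      rw [hTP i l hi hl, if_neg (by rcases hAv l with h0 | h0 <;> rw [h0] <;> omega), hz1, hz2]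
      have : (P.getD l []).getD i 0 = 0 := by
        apply List.getD_eq_default
        have := hPl l
        omega
      rw [this]
      simp

theorem pv_base_rel (rows size : Nat) (Av : List Int)
    (hAlen : Av.length = size)
    (hAv : ∀ ll, Av.getD ll 0 = 0 ∨ Av.getD ll 0 = 1)
    (hx : ∀ j : Nat, (Av.getD j 0).toNat < rows) :
    pvRel rows size 0
      ((PySem.List.enumerate Av 0).foldl (fun T p => pvSet2 T p.2.toNat p.1.toNat 1)
        (List.replicate rows (List.replicate size 0)))
      (Av.map (fun a => List.replicate a.toNat 0 ++ [1])) := by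
  have hT0r : ∀ i : Nat, i < (List.replicate rows (List.replicate size 0 : List Int)).length →
      ((List.replicate rows (List.replicate size 0 : List Int)).getD i []).length = size := by
    intro i hi
    rw [pv_getD_replicate, if_pos (by simpa using hi)]
    simp
  have hx' : ∀ j : Nat, (Av.getD j 0).toNat <
      (List.replicate rows (List.replicate size 0 : List Int)).length := by
    intro j; simpa using hx j
  have hinit := pv_init_getD size Av 0 (List.replicate rows (List.replicate size 0)) hT0r hx'
    (by omega)
  obtain ⟨hlen, hrows⟩ := pv_init_rows size (PySem.List.enumerate Av 0)
    (List.replicate rows (List.replicate size 0))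
  refine ⟨by simpa using hlen, by simpa [hlen] using hrows hT0r, by simp [hAlen], ?_, ?_⟩
  · intro l
    rcases lt_or_ge l Av.length with hl | hl
    · rw [List.getD_eq_getElem _ _ (by simpa using hl)]
      simp only [List.getElem_map]
      rw [List.length_append, List.length_replicate]
      have := hAv l
      rw [List.getD_eq_getElem _ _ hl] at this
      rcases this with h0 | h0 <;> rw [h0] <;> simp
    · rw [List.getD_eq_default _ _ (by simpa using hl)]
      simp
  · intro i l hi hl
    have h0 := hinit i l
    rw [show ((0:Nat):Int) = 0 by simp] at h0
    have hT0 : ((List.replicate rows (List.replicate size 0 : List Int)).getD i []).getD l 0 = 0 := by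
      rw [pv_getD_replicate, if_pos hi, pv_getD_replicate, if_pos hl]
    have hpol : (Av.map (fun a => List.replicate a.toNat 0 ++ [1])).getD l []
        = List.replicate (Av.getD l 0).toNat (0:Int) ++ [1] := by
      rw [List.getD_eq_getElem _ _ (by simpa [hAlen] using hl), List.getElem_map,
        List.getD_eq_getElem _ _ (by rwa [hAlen])]
    have key : (if 0 ≤ l ∧ l < 0 + Av.length ∧ i = (Av.getD (l - 0) 0).toNat then (1:Int)
          else ((List.replicate rows (List.replicate size 0 : List Int)).getD i []).getD l 0)
        = (List.replicate (Av.getD l 0).toNat (0:Int) ++ [1]).getD i 0 := by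
      rw [hT0, pv_shift_getD]
      simp only [Nat.sub_zero]
      by_cases hc : i = (Av.getD l 0).toNat
      · rw [if_pos ⟨Nat.zero_le l, by omega, hc⟩, if_neg (by omega),
          show i - (Av.getD l 0).toNat = 0 by omega]
        simp
      · rw [if_neg (fun hcon => hc hcon.2.2)]
        rcases lt_or_ge i (Av.getD l 0).toNat with hlt | hge
        · rw [if_pos hlt]
        · rw [if_neg (by omega),
            List.getD_eq_default _ _ (by simpa using (show 1 ≤ i - (Av.getD l 0).toNat by omega))]
    exact h0.trans (key.trans (congrArg (fun xs => List.getD xs i 0) hpol.symm))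

theorem pv_levels (rows size half : Nat) (Av : List Int) (T1 P0 : List (List Int))
    (hsz : size = 2 * half)
    (hAv : ∀ ll, Av.getD ll 0 = 0 ∨ Av.getD ll 0 = 1)
    (hbase : pvRel rows size 0 T1 P0) :
    ∀ t : Nat, t + 2 ≤ rows →
    pvRel rows size t
      ((PySem.List.pyRange 1 ((t : Int) + 1) 1).foldl
        (fun T lvl => pvStepA Av half size (lvl + 1) T) T1)
      ((PySem.List.pyRange 1 ((t : Int) + 1) 1).foldl
        (fun P _lvl => pvStepB Av half size P) P0) := by
  intro t
  induction t with
  | zero =>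
    intro _
    rw [show ((0:Nat):Int) + 1 = 1 by simp, PySem.List.pyRange_one_eq_nil (le_refl 1),
      List.foldl_nil, List.foldl_nil]
    exact hbase
  | succ t ih =>
    intro hrows
    rw [show (((t+1:Nat)):Int) + 1 = ((t:Int) + 1) + 1 by push_cast; ring,
      PySem.List.pyRange_one_succ_right (by omega), List.foldl_append, List.foldl_append,
      List.foldl_cons, List.foldl_nil, List.foldl_cons, List.foldl_nil]
    have hstep := pv_step_rel rows size half Av hsz hAv t _ _ (ih (by omega)) (by omega)
    rw [show ((t:Int) + 1) + 1 = (t:Int) + 2 by ring]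
    exact hstep

-- ===== VERDICT (by name: the statement is the Claim_ definition above) =====
theorem gen_T_array_spec : Claim_equal_gen_T_array := by
  unfold Claim_equal_gen_T_array Spec_gen_T_array
  intro n k v _ hpre
  obtain ⟨hk, hv, hvlt, hdis⟩ := hpre
  simp only [gen_T_array, gen_T_array_alt]
  set K := k.toNat with hKdef
  set size := 2 ^ K with hsizedef
  set rows := ((n - k + 1) + 1).toNat with hrowsdef
  set Av : List Int := List.replicate (v + 1).toNat (0:Int) ++
      List.replicate (((2 : Int) ^ K) - (v + 1)).toNat (1:Int) with hAvdef
  have hcast : ((2 : Int) ^ K) = ((2 ^ K : Nat) : Int) := by push_cast; ring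
  rw [hcast] at hvlt
  have hAlen : Av.length = size := by
    rw [hAvdef, List.length_append, List.length_replicate, List.length_replicate, hcast]
    omega
  have hAv01 : ∀ ll : Nat, Av.getD ll 0 = 0 ∨ Av.getD ll 0 = 1 := by
    intro ll
    rcases lt_or_ge ll Av.length with h | h
    · have hmem : Av.getD ll 0 ∈ Av := by
        rw [List.getD_eq_getElem _ _ h]; exact List.getElem_mem h
      rw [hAvdef] at hmem
      rcases List.mem_append.1 hmem with hm | hm
      · left; exact List.eq_of_mem_replicate hm
      · right; exact List.eq_of_mem_replicate hm
    · left; exact List.getD_eq_default _ _ h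
  have hx : ∀ j : Nat, (Av.getD j 0).toNat < rows := by
    rcases hdis with ⟨hk1, hkn⟩ | ⟨hk0, hn0⟩ | ⟨hnk, hveq⟩
    · have hr2 : 2 ≤ rows := by rw [hrowsdef]; omega
      intro j; rcases hAv01 j with h | h <;> rw [h] <;> omega
    · have hr2 : 2 ≤ rows := by rw [hrowsdef]; omega
      intro j; rcases hAv01 j with h | h <;> rw [h] <;> omega
    · have hr1 : 1 ≤ rows := by rw [hrowsdef]; omega
      have h0 : (((2 : Int) ^ K) - (v + 1)).toNat = 0 := by rw [hcast]; omega
      intro j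
      have hz : Av.getD j 0 = 0 := by
        rw [hAvdef, h0]
        simp only [List.replicate_zero, List.append_nil]
        rw [pv_getD_replicate]
        split_ifs <;> rfl
      rw [hz]; omega
  have hfill : (PySem.List.enumerate Av 0).foldl
      (fun P p => P.set p.1.toNat (List.replicate p.2.toNat 0 ++ [1]))
      (List.replicate size ([] : List Int))
      = Av.map (fun a => List.replicate a.toNat 0 ++ [1]) := by
    have h := pv_enum_set_fill (fun a : Int => List.replicate a.toNat (0:Int) ++ [(1:Int)]) Av 0
      (List.replicate size []) (by simp [hAlen])
    simpa [hAlen] using h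
  rw [hfill]
  have hbase := pv_base_rel rows size Av hAlen hAv01 hx
  rcases le_or_gt (n - k) 0 with hlev | hlev
  · -- no level runs
    rw [PySem.List.pyRange_one_eq_nil (by omega), List.foldl_nil, List.foldl_nil]
    obtain ⟨hT, hTr, hP, hPl, hTP⟩ := hbase
    apply List.ext_getElem (by simp [hT])
    intro i h1 h2
    rw [List.getElem_map, List.getElem_range]
    apply List.ext_getElem (by rw [← List.getD_eq_getElem _ _ h1, hTr i (by omega)]; simp)
    intro l hl1 hl2
    rw [List.getElem_map, List.getElem_range]
    have hiR : i < rows := by simpa using h2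
    have hlS : l < size := by simpa using hl2
    rw [show (List.foldl (fun T p => pvSet2 T p.2.toNat p.1.toNat 1)
        (List.replicate rows (List.replicate size 0)) (PySem.List.enumerate Av 0))[i][l]
      = ((List.foldl (fun T p => pvSet2 T p.2.toNat p.1.toNat 1)
        (List.replicate rows (List.replicate size 0)) (PySem.List.enumerate Av 0)).getD i []).getD l 0 by
        rw [List.getD_eq_getElem _ _ h1]
        rw [List.getD_eq_getElem _ _ (by rw [← List.getD_eq_getElem _ _ h1, hTr i (by omega)]; exact hlS)]]
    exact hTP i l hiR hlS
  · -- at least one level: k ≥ 1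
    have hk1 : 1 ≤ k := by rcases hdis with ⟨h1, _⟩ | ⟨h1, h2⟩ | ⟨h1, _⟩ <;> omega
    have hK1 : 1 ≤ K := by rw [hKdef]; omega
    have hsz : size = 2 * 2 ^ (K - 1) := by
      rw [hsizedef]
      conv_lhs => rw [show K = (K - 1) + 1 by omega]
      rw [pow_succ]; ring
    have hhalfB : size / 2 = 2 ^ (K - 1) := by rw [hsz]; omega
    simp only [hhalfB]
    set N := (n - k).toNat with hNdef
    rw [show n - k + 1 = ((N : Int) + 1) by omega]
    have hrel := pv_levels rows size (2 ^ (K - 1)) Av _ _ hsz hAv01 hbase N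
      (by rw [hrowsdef]; omega)
    obtain ⟨hT, hTr, hP, hPl, hTP⟩ := hrel
    apply List.ext_getElem (by simp [hT])
    intro i h1 h2
    rw [List.getElem_map, List.getElem_range]
    apply List.ext_getElem (by rw [← List.getD_eq_getElem _ _ h1, hTr i (by omega)]; simp)
    intro l hl1 hl2
    rw [List.getElem_map, List.getElem_range]
    have hiR : i < rows := by simpa using h2
    have hlS : l < size := by simpa using hl2
    rw [show ((PySem.List.pyRange 1 ((N : Int) + 1) 1).foldl
        (fun T lvl => pvStepA Av (2 ^ (K - 1)) size (lvl + 1) T)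
        (List.foldl (fun T p => pvSet2 T p.2.toNat p.1.toNat 1)
          (List.replicate rows (List.replicate size 0)) (PySem.List.enumerate Av 0)))[i][l]
      = (((PySem.List.pyRange 1 ((N : Int) + 1) 1).foldl
        (fun T lvl => pvStepA Av (2 ^ (K - 1)) size (lvl + 1) T)
        (List.foldl (fun T p => pvSet2 T p.2.toNat p.1.toNat 1)
          (List.replicate rows (List.replicate size 0)) (PySem.List.enumerate Av 0))).getD i []).getD l 0 by
        rw [List.getD_eq_getElem _ _ h1]
        rw [List.getD_eq_getElem _ _ (by rw [← List.getD_eq_getElem _ _ h1, hTr i (by omega)]; exact hlS)]]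
    exact hTP i l hiR hlS
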